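-- pv_equiv track=rewrite | github.com/DSheth97/Automated-Tambola | checkPrizesForTambola.py | isLunch
-- ===== SOURCE A (Python) =====
-- def isLunch(arr,board):
--     flag=0
--     for i in arr:
--         if(i>30 and (i<=60) and (i not in board)):
--             flag=0
--             break
--         else:
--             flag=1
--     if flag==0:
--         return 0
--     else:
--         return 1
-- ===== SOURCE B (Python) =====
-- def isLunch(arr, board):
--     if not arr:
--         return 0
--     need = sorted(i for i in arr if 30 < i <= 60)
--     have = sorted(board)
--     j = 0
--     for x in need:
--         while j < len(have) and have[j] < x:
--             j += 1
--         if j == len(have) or have[j] != x: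
--             return 0
--     return 1
-- ===== Notes on version B (the rewrite author's own statement) =====
-- stated objective: alternative
-- what changed: Replaces A's flag-and-break membership loop (list scan per element) with sort both sides and a two-pointer merge scan: filter the needed numbers in (30,60], sort them and the board, and walk both sorted lists once to decide containment.
import Mathlib
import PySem

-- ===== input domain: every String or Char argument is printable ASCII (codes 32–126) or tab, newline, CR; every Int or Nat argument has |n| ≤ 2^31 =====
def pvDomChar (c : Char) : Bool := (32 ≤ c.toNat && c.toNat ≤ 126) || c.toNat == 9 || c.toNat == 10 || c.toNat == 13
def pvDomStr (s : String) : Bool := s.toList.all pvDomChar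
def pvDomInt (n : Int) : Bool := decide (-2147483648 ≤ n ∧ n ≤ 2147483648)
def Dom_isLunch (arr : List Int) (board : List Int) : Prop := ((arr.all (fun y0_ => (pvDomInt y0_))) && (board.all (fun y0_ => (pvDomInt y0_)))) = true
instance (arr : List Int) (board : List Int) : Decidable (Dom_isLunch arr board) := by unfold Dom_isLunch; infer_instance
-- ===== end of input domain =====

-- B replaces A's flag-and-break membership loop by sort-both-then-two-pointer-merge containment; objective: alternative.


-- ===== PORT A =====
-- the loop-breaking condition of A's if, as written in the Python
def pvBad (board : List Int) (i : Int) : Bool :=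
  30 < i && i ≤ 60 && !board.contains i

-- the for-loop with its flag and its break, step for step
def isLunchLoop (board : List Int) : List Int → Int → Int
  | [], flag => flag
  | i :: rest, _ =>
    if pvBad board i then 0
    else isLunchLoop board rest 1

def isLunch (arr : List Int) (board : List Int) : Int :=
  if isLunchLoop board arr 0 = 0 then 0 else 1

-- ===== PORT B =====
-- Source B's inner while loop: advance j past the sorted haves below x (the suffix from j)
def pvDropLt (x : Int) : List Int → List Int
  | [] => []
  | y :: ys => if y < x then pvDropLt x ys else y :: ys

-- Source B's for loop over the sorted needs, carrying the suffix of the sorted haves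
def pvScan : List Int → List Int → Int
  | [], _ => 1
  | x :: need, haves =>
    match pvDropLt x haves with
    | [] => 0
    | y :: ys => if y ≠ x then 0 else pvScan need (y :: ys)

def isLunch_alt (arr : List Int) (board : List Int) : Int :=
  if arr = [] then 0
  else
    pvScan (PySem.List.sorted (arr.filter (fun i => 30 < i && i ≤ 60)) (fun x => x) false)
           (PySem.List.sorted board (fun x => x) false)

-- ===== PRECONDITION & SPEC =====
def Spec_isLunch (arr : List Int) (board : List Int) (out : Int) : Prop := out = isLunch_alt arr board
instance (arr : List Int) (board : List Int) (out : Int) : Decidable (Spec_isLunch arr board out) := by unfold Spec_isLunch; infer_instance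

-- ===== CLAIM =====
def Claim_equal_isLunch : Prop := ∀ (arr : List Int) (board : List Int), Dom_isLunch arr board → Spec_isLunch arr board (isLunch arr board)

-- ===== LEMMAS AND PROOFS =====
-- the loop, started on a nonempty list from any flag, returns 0 iff some element breaks
theorem isLunchLoop_char (board : List Int) (i : Int) (rest : List Int) (f : Int) :
    isLunchLoop board (i :: rest) f = if (i :: rest).any (pvBad board) then 0 else 1 := by
  induction rest generalizing i f with
  | nil => cases hb : pvBad board i <;> simp [isLunchLoop, hb]
  | cons k rest ih =>
    cases hb : pvBad board i
    · rw [show isLunchLoop board (i :: k :: rest) f = isLunchLoop board (k :: rest) 1 by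
        simp [isLunchLoop, hb], ih]
      simp [hb]
    · simp [isLunchLoop, hb]

-- dropping elements below x never loses an element ≥ x
theorem mem_pvDropLt (x z : Int) (hxz : x ≤ z) (hs : List Int) :
    z ∈ pvDropLt x hs ↔ z ∈ hs := by
  induction hs with
  | nil => simp [pvDropLt]
  | cons y ys ih =>
    by_cases hy : y < x
    · have : z ≠ y := by omega
      simp [pvDropLt, hy, ih, this]
    · simp [pvDropLt, hy]

-- the suffix kept by pvDropLt is a suffix of the input
theorem pvDropLt_suffix (x : Int) (hs : List Int) : (pvDropLt x hs).IsSuffix hs := by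
  induction hs with
  | nil => simp [pvDropLt]
  | cons y ys ih =>
    by_cases hy : y < x
    · simp only [pvDropLt, hy, if_pos]
      exact ih.trans (List.suffix_cons y ys)
    · simp [pvDropLt, hy]

-- the first element pvDropLt keeps is not below x
theorem pvDropLt_head (x : Int) (hs : List Int) (y : Int) (ys : List Int)
    (h : pvDropLt x hs = y :: ys) : ¬ y < x := by
  induction hs with
  | nil => simp [pvDropLt] at h
  | cons a as ih =>
    by_cases ha : a < x
    · exact ih (by simpa [pvDropLt, ha] using h)
    · simp [pvDropLt, ha] at h
      omega

-- the merge scan on sorted lists decides containment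
theorem pvScan_char : ∀ (need hs : List Int),
    need.Pairwise (· ≤ ·) → hs.Pairwise (· ≤ ·) →
    pvScan need hs = if need.all (fun z => hs.contains z) then 1 else 0 := by
  intro need
  induction need with
  | nil => intro hs _ _; simp [pvScan]
  | cons x rest ih =>
    intro hs hn hh
    have hx_rest : ∀ z ∈ rest, x ≤ z := (List.pairwise_cons.mp hn).1
    have hrest : rest.Pairwise (· ≤ ·) := (List.pairwise_cons.mp hn).2
    cases hd : pvDropLt x hs with
    | nil =>
      have hxmem : x ∉ hs := by
        rw [← mem_pvDropLt x x le_rfl hs, hd]; simp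
      simp [pvScan, hd, hxmem]
    | cons y ys =>
      have hsuf : (y :: ys).IsSuffix hs := hd ▸ pvDropLt_suffix x hs
      have hsorted' : (y :: ys).Pairwise (· ≤ ·) := hh.sublist hsuf.sublist
      have hxy : ¬ y < x := pvDropLt_head x hs y ys hd
      by_cases hyx : y = x
      · have hxmem : x ∈ hs := by
          rw [← mem_pvDropLt x x le_rfl hs, hd]; simp [hyx]
        have hmem_eq : ∀ z ∈ rest, ((y :: ys).contains z = hs.contains z) := by
          intro z hz
          have hz' := mem_pvDropLt x z (hx_rest z hz) hs
          rw [hd] at hz'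
          rw [Bool.eq_iff_iff, List.contains_iff_mem, List.contains_iff_mem]
          exact hz'
        rw [show pvScan (x :: rest) hs = pvScan rest (y :: ys) by simp [pvScan, hd, hyx],
            ih (y :: ys) hrest hsorted']
        have hall : rest.all (fun z => (y :: ys).contains z) = rest.all (fun z => hs.contains z) := by
          rw [Bool.eq_iff_iff]
          simp only [List.all_eq_true]
          exact ⟨fun h z hz => by rw [← hmem_eq z hz]; exact h z hz,
                 fun h z hz => by rw [hmem_eq z hz]; exact h z hz⟩
        rw [hall]
        simp [hxmem]
      · have hxlty : x < y := by omega
        have hxmem : x ∉ hs := by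
          rw [← mem_pvDropLt x x le_rfl hs, hd]
          intro hm
          rcases List.mem_cons.mp hm with h | h
          · omega
          · have := (List.pairwise_cons.mp hsorted').1 x h
            omega
        simp [pvScan, hd, hyx, hxmem]

-- the sorted containment test over the sorted needs equals "no element of arr breaks A's loop"
theorem all_sorted_eq_no_bad (arr board : List Int) :
    ((PySem.List.sorted (arr.filter (fun i => 30 < i && i ≤ 60)) (fun x => x) false).all
      (fun z => (PySem.List.sorted board (fun x => x) false).contains z))
      = !arr.any (pvBad board) := by
  rw [Bool.eq_iff_iff]
  simp only [List.all_eq_true, List.contains_iff_mem, PySem.List.mem_sorted, List.mem_filter,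
    Bool.not_eq_eq_eq_not, Bool.not_true, List.any_eq_false, pvBad]
  constructor
  · intro h z hz
    by_cases hc : (decide (30 < z) && decide (z ≤ 60)) = true
    · have hm := h z ⟨hz, hc⟩
      simp [hc, hm]
    · simp [Bool.and_eq_true] at hc ⊢
      omega
  · intro h z hz
    have := h z hz.1
    rw [hz.2] at this
    simpa [List.contains_iff_mem] using this
-- ===== VERDICT =====
theorem isLunch_spec : Claim_equal_isLunch := by
  intro arr board _
  unfold Spec_isLunch
  cases arr with
  | nil => simp [isLunch, isLunch_alt, isLunchLoop]
  | cons i rest =>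
    rw [show isLunch (i :: rest) board
        = if (i :: rest).any (pvBad board) then 0 else 1 by
      simp only [isLunch, isLunchLoop_char]
      cases (i :: rest).any (pvBad board) <;> simp]
    rw [show isLunch_alt (i :: rest) board
        = if (i :: rest).any (pvBad board) then 0 else 1 by
      unfold isLunch_alt
      rw [if_neg (by simp),
          pvScan_char _ _ (PySem.List.sorted_pairwise _ _) (PySem.List.sorted_pairwise _ _),
          all_sorted_eq_no_bad]
      cases (i :: rest).any (pvBad board) <;> simp]
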